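-- pv_equiv track=rewrite | github.com/timjonkerpostnl/advent_of_code | src/day14/assignment1.py | weight_in_column
-- ===== SOURCE A (Python) =====
-- from typing import List
--
-- def weight_in_column(row: List[str]) -> int:
--     row.append("#")
--     row.insert(0, "#")
--     obstacles = [index for index, char in enumerate(row) if char == "#"]
--     summed = 0
--     for obstacle1, obstacle2 in zip(obstacles[:-1], obstacles[1:]):
--         num_rocks_in_between = sum(1 for x in row[obstacle1:obstacle2] if x == "O")
--         last_rock_position = obstacle1 + num_rocks_in_between
--         summed += sum(len(row) - 2 - (x - 1) for x in range(obstacle1 + 1, last_rock_position + 1))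
--     return summed
-- ===== SOURCE B (Python) =====
-- from typing import List
--
-- def weight_in_column(row: List[str]) -> int:
--     row.append("#")
--     row.insert(0, "#")
--     length = len(row)
--     total = 0
--     next_slot = 0
--     for i, char in enumerate(row):
--         if char == "#":
--             next_slot = i + 1
--         elif char == "O":
--             total += length - 1 - next_slot
--             next_slot += 1
--     return total
-- ===== Notes on version B (the rewrite author's own statement) =====
-- stated objective: simpler
-- what changed: Replaces A's obstacle-index list plus per-segment slice/count/range passes with one linear sweep keeping a running next-landing-slot counter.
import Mathlib
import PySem

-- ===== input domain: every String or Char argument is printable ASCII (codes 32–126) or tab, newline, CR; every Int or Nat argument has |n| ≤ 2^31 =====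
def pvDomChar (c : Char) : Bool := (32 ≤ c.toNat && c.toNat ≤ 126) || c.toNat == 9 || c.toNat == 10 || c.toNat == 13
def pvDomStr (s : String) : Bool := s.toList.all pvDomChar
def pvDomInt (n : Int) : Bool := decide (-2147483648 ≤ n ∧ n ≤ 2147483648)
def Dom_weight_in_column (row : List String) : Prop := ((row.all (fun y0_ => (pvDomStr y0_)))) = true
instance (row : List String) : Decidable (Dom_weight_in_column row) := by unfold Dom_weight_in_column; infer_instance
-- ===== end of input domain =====

-- B replaces A's obstacle-index list and per-segment slice/count/range passes by one
-- linear sweep with a running "next landing slot"; same return value (both Pythons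
-- mutate `row` identically: append "#" and insert "#" at the front).


-- ===== PORT A =====
def weight_in_column (row : List String) : Int :=
  let row1 := row ++ ["#"]                -- row.append("#")
  let row2 := "#" :: row1                 -- row.insert(0, "#")
  let obstacles : List Int :=
    (PySem.List.enumerate row2 0).foldr
      (fun p acc => if p.2 = "#" then p.1 :: acc else acc) []
  ((PySem.List.slice obstacles none (some (-1))).zip
      (PySem.List.slice obstacles (some 1) none)).foldl
    (fun summed p =>
      let num_rocks_in_between : Int :=
        ((PySem.List.slice row2 (some p.1) (some p.2)).map
          (fun x => if x = "O" then (1 : Int) else 0)).sum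
      let last_rock_position := p.1 + num_rocks_in_between
      summed +
        ((PySem.List.pyRange (p.1 + 1) (last_rock_position + 1) 1).map
          (fun x => (row2.length : Int) - 2 - (x - 1))).sum)
    0

-- ===== PORT B =====
def weight_in_column_alt (row : List String) : Int :=
  let row2 := "#" :: (row ++ ["#"])
  let length : Int := row2.length
  ((PySem.List.enumerate row2 0).foldl
    (fun (st : Int × Int) p =>
      if p.2 = "#" then (st.1, p.1 + 1)
      else if p.2 = "O" then (st.1 + (length - 1 - st.2), st.2 + 1)
      else st)
    (0, 0)).1

-- ===== PRECONDITION & SPEC =====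
def Spec_weight_in_column (row : List String) (out : Int) : Prop := out = weight_in_column_alt row
instance (row : List String) (out : Int) : Decidable (Spec_weight_in_column row out) := by unfold Spec_weight_in_column; infer_instance

-- ===== CLAIM (what is proved, stated in full; the proofs are below) =====
def Claim_equal_weight_in_column : Prop := ∀ (row : List String), Dom_weight_in_column row → Spec_weight_in_column row (weight_in_column row)

-- ===== LEMMAS AND PROOFS =====

-- Common sweep: index i, next landing slot `next`, total accumulated separately.
def gW (L : Int) : List String → Int → Int → Int
  | [], _, _ => 0
  | c :: cs, i, next =>
    if c = "#" then gW L cs (i + 1) (i + 1)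
    else if c = "O" then (L - 1 - next) + gW L cs (i + 1) (next + 1)
    else gW L cs (i + 1) next

-- Indices of "#" starting at offset i.
def obsW : List String → Int → List Int
  | [], _ => []
  | c :: cs, i => if c = "#" then i :: obsW cs (i + 1) else obsW cs (i + 1)

-- A's per-pair contribution, exactly as the port computes it.
def contribW (R : List String) (L o1 o2 : Int) : Int :=
  ((PySem.List.pyRange (o1 + 1)
      (o1 + ((PySem.List.slice R (some o1) (some o2)).map
        (fun x => if x = "O" then (1 : Int) else 0)).sum + 1) 1).map
    (fun x => L - 2 - (x - 1))).sum

-- A's sum over consecutive obstacle pairs.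
def adjW (R : List String) (L : Int) : List Int → Int
  | o1 :: o2 :: rest => contribW R L o1 o2 + adjW R L (o2 :: rest)
  | _ => 0

def countO (t : List String) : Int :=
  ((t.map (fun x => if x = "O" then (1 : Int) else 0)).sum)

theorem countO_nonneg (t : List String) : 0 ≤ countO t := by
  induction t with
  | nil => simp [countO]
  | cons c cs ih =>
    simp only [countO, List.map_cons, List.sum_cons] at *
    split_ifs <;> omega

theorem countO_cons (c : String) (cs : List String) :
    countO (c :: cs) = (if c = "O" then (1 : Int) else 0) + countO cs := by
  simp [countO]

def rangeSum (L a b : Int) : Int :=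
  ((PySem.List.pyRange a b 1).map (fun x => L - 2 - (x - 1))).sum

-- B's fold computes gW.
theorem foldB (L : Int) (cs : List String) :
    ∀ (i next total : Int),
      ((PySem.List.enumerate cs i).foldl
        (fun (st : Int × Int) p =>
          if p.2 = "#" then (st.1, p.1 + 1)
          else if p.2 = "O" then (st.1 + (L - 1 - st.2), st.2 + 1)
          else st)
        (total, next)).1 = total + gW L cs i next := by
  induction cs with
  | nil => intro i next total; simp [PySem.List.enumerate_nil, gW]
  | cons c cs ih =>
    intro i next total
    rw [PySem.List.enumerate_cons]
    simp only [List.foldl_cons, gW]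
    by_cases h1 : c = "#"
    · simp only [h1, ih]; simp
    · by_cases h2 : c = "O"
      · simp only [h2, ih]; simp; ring
      · simp [h1, h2, ih]

-- A's comprehension computes obsW.
theorem foldObs (cs : List String) : ∀ (i : Int),
    (PySem.List.enumerate cs i).foldr
      (fun p acc => if p.2 = "#" then p.1 :: acc else acc) [] = obsW cs i := by
  induction cs with
  | nil => intro i; simp [PySem.List.enumerate_nil, obsW]
  | cons c cs ih =>
    intro i
    rw [PySem.List.enumerate_cons]
    simp only [List.foldr_cons, obsW, ih]

-- Adjacent pairs of a list.
def pairsW : List Int → List (Int × Int)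
  | o1 :: o2 :: rest => (o1, o2) :: pairsW (o2 :: rest)
  | _ => []

theorem zip_pairsW : ∀ (l : List Int), l.dropLast.zip l.tail = pairsW l := by
  intro l
  match l with
  | [] => simp [pairsW]
  | [o1] => simp [pairsW]
  | o1 :: o2 :: rest =>
    have hd : (o1 :: o2 :: rest).dropLast = o1 :: (o2 :: rest).dropLast := by
      simp [List.dropLast]
    rw [hd]
    simp only [List.tail_cons, pairsW]
    have := zip_pairsW (o2 :: rest)
    simp only [List.tail_cons] at this
    cases rest with
    | nil => simp [pairsW]
    | cons o3 r =>
      have hd2 : (o2 :: o3 :: r).dropLast = o2 :: (o3 :: r).dropLast := by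
        simp [List.dropLast]
      rw [hd2] at this ⊢
      rw [List.zip_cons_cons, this]

-- A's zip-fold computes adjW.
theorem foldAdj (R : List String) (L : Int) (l : List Int) :
    ∀ (acc : Int),
      (l.dropLast.zip l.tail).foldl
        (fun summed p =>
          let num : Int :=
            ((PySem.List.slice R (some p.1) (some p.2)).map
              (fun x => if x = "O" then (1 : Int) else 0)).sum
          let last := p.1 + num
          summed +
            ((PySem.List.pyRange (p.1 + 1) (last + 1) 1).map
              (fun x => L - 2 - (x - 1))).sum)
        acc = acc + adjW R L l := by
  rw [zip_pairsW]
  induction l with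
  | nil => intro acc; simp [pairsW, adjW]
  | cons o1 rest ih =>
    intro acc
    cases rest with
    | nil => simp [pairsW, adjW]
    | cons o2 rest' =>
      simp only [pairsW, List.foldl_cons]
      rw [ih]
      simp only [adjW, contribW]
      ring

-- Peeling a '#'-free prefix from gW.
theorem gW_noHash (L : Int) (t : List String) (ht : "#" ∉ t) :
    ∀ (v : List String) (i next : Int),
      gW L (t ++ v) i next
        = rangeSum L (next) (next + countO t) + gW L v (i + t.length) (next + countO t) := by
  induction t with
  | nil =>
    intro v i next
    simp [rangeSum, countO, PySem.List.pyRange_one_eq_nil (le_refl next)]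
  | cons c cs ih =>
    intro v i next
    have hc : c ≠ "#" := fun h => ht (h ▸ List.mem_cons_self ..)
    have hcs : "#" ∉ cs := fun h => ht (List.mem_cons_of_mem _ h)
    simp only [List.cons_append, gW, if_neg hc]
    by_cases hO : c = "O"
    · rw [if_pos hO, ih hcs]
      have hcount : countO (c :: cs) = 1 + countO cs := by
        rw [countO_cons, if_pos hO]
      have hnn := countO_nonneg cs
      have hlt : next < next + countO (c :: cs) := by omega
      have : rangeSum L next (next + countO (c :: cs))
          = (L - 1 - next) + rangeSum L (next + 1) (next + 1 + countO cs) := by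
        unfold rangeSum
        rw [PySem.List.pyRange_one_cons hlt]
        have : next + countO (c :: cs) = next + 1 + countO cs := by omega
        rw [this]
        simp only [List.map_cons, List.sum_cons]
        ring
      rw [this]
      have h1 : (i + 1) + (cs.length : Int) = i + ((c :: cs).length : Int) := by
        simp; ring
      have h2 : next + 1 + countO cs = next + countO (c :: cs) := by omega
      rw [h1, h2]
      ring
    · rw [if_neg hO, ih hcs]
      have hcount : countO (c :: cs) = countO cs := by
        rw [countO_cons, if_neg hO]; ring
      have h1 : (i + 1) + (cs.length : Int) = i + ((c :: cs).length : Int) := by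
        simp; ring
      rw [h1, hcount]

theorem obsW_noHash (t : List String) (ht : "#" ∉ t) :
    ∀ (v : List String) (i : Int), obsW (t ++ v) i = obsW v (i + t.length) := by
  induction t with
  | nil => intro v i; simp
  | cons c cs ih =>
    intro v i
    have hc : c ≠ "#" := fun h => ht (h ▸ List.mem_cons_self ..)
    have hcs : "#" ∉ cs := fun h => ht (List.mem_cons_of_mem _ h)
    simp only [List.cons_append, obsW, if_neg hc, ih hcs]
    congr 1
    simp; ring

-- Split a list at its first "#".
theorem split_first_hash (u : List String) (h : "#" ∈ u) :
    ∃ t u2, u = t ++ "#" :: u2 ∧ "#" ∉ t := by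
  induction u with
  | nil => cases h
  | cons c cs ih =>
    by_cases hc : c = "#"
    · exact ⟨[], cs, by simp [hc], by simp⟩
    · have : "#" ∈ cs := by
        cases List.mem_cons.mp h with
        | inl h' => exact absurd h'.symm hc
        | inr h' => exact h'
      obtain ⟨t, u2, h1, h2⟩ := ih this
      exact ⟨c :: t, u2, by simp [h1], by
        intro hm
        cases List.mem_cons.mp hm with
        | inl h' => exact hc h'.symm
        | inr h' => exact h2 h'⟩

-- Main segment induction: A's pair-sum on the obstacle list equals the sweep.
theorem main_lemma (n : Nat) :
    ∀ (u p R : List String), u.length ≤ n →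
      R = p ++ "#" :: u →
      (u = [] ∨ u.getLast? = some "#") →
      adjW R (R.length : Int) (obsW ("#" :: u) (p.length : Int))
        = gW (R.length : Int) u ((p.length : Int) + 1) ((p.length : Int) + 1) := by
  induction n with
  | zero =>
    intro u p R hlen hR hlast
    have hu : u = [] := List.eq_nil_of_length_eq_zero (Nat.le_zero.mp hlen)
    subst hu
    simp [obsW, adjW, gW]
  | succ n ih =>
    intro u p R hlen hR hlast
    by_cases hmem : "#" ∈ u
    · obtain ⟨t, u2, hu, ht⟩ := split_first_hash u hmem
      -- obstacle list shape
      have hobs : obsW ("#" :: u) (p.length : Int)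
          = (p.length : Int) :: ((p.length : Int) + 1 + t.length)
              :: obsW u2 ((p.length : Int) + 1 + t.length + 1) := by
        simp only [obsW]
        rw [hu, obsW_noHash t ht]
        simp [obsW]
      have hlen2 : u2.length ≤ n := by
        have : u.length = t.length + 1 + u2.length := by simp [hu]; omega
        omega
      have hR2 : R = (p ++ "#" :: t) ++ "#" :: u2 := by
        rw [hR, hu]; simp
      have hlast2 : u2 = [] ∨ u2.getLast? = some "#" := by
        by_cases h2 : u2 = []
        · exact Or.inl h2
        · right
          cases hlast with
          | inl h => rw [h] at hu; exact absurd hu.symm (by simp)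
          | inr h =>
            have hre : t ++ "#" :: u2 = (t ++ ["#"]) ++ u2 := by simp
            rw [hu, hre, List.getLast?_append_of_ne_nil _ h2] at h
            exact h
      have hplen : ((p ++ "#" :: t).length : Int) = (p.length : Int) + 1 + t.length := by
        simp; ring
      have hIH := ih u2 (p ++ "#" :: t) R hlen2 hR2 hlast2
      rw [hplen] at hIH
      -- obstacle list for the tail
      have hobs2 : obsW ("#" :: u2) ((p.length : Int) + 1 + t.length)
          = ((p.length : Int) + 1 + t.length) :: obsW u2 ((p.length : Int) + 1 + t.length + 1) := by
        simp [obsW]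
      rw [hobs2] at hIH
      -- the slice in contribW is "#" :: t
      have hslice : PySem.List.slice R (some (p.length : Int))
            (some ((p.length : Int) + 1 + t.length)) = "#" :: t := by
        have harg : (p.length : Int) + 1 + (t.length : Int)
            = (p.length : Int) + ((t.length + 1 : Nat) : Int) := by push_cast; ring
        rw [harg, PySem.List.slice_natCast_add]
        rw [hR, List.drop_left, hu]
        show ("#" :: (t ++ "#" :: u2)).take (t.length + 1) = "#" :: t
        simp
      have hnum : ((PySem.List.slice R (some (p.length : Int))
            (some ((p.length : Int) + 1 + t.length))).map
            (fun x => if x = "O" then (1 : Int) else 0)).sum = countO t := by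
        rw [hslice]; simp [countO]
      have hcontrib : contribW R (R.length : Int) (p.length : Int)
            ((p.length : Int) + 1 + t.length)
          = rangeSum (R.length : Int) ((p.length : Int) + 1)
              ((p.length : Int) + 1 + countO t) := by
        unfold contribW rangeSum
        rw [hnum]
        have : (p.length : Int) + countO t + 1 = (p.length : Int) + 1 + countO t := by ring
        rw [this]
      -- gW side: peel the '#'-free prefix t, then the '#' head
      have hg : gW (R.length : Int) u ((p.length : Int) + 1) ((p.length : Int) + 1)
          = rangeSum (R.length : Int) ((p.length : Int) + 1)
              ((p.length : Int) + 1 + countO t)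
            + gW (R.length : Int) u2 ((p.length : Int) + 1 + t.length + 1)
                ((p.length : Int) + 1 + t.length + 1) := by
        rw [hu, gW_noHash (R.length : Int) t ht]
        simp [gW]
      rw [hobs, hg]
      simp only [adjW]
      rw [hIH, hcontrib]
    · have hu : u = [] := by
        cases hlast with
        | inl h => exact h
        | inr h =>
          exact absurd (List.mem_of_getLast? h) hmem
      subst hu
      simp [obsW, adjW, gW]

theorem weight_in_column_eq (row : List String) :
    weight_in_column row = weight_in_column_alt row := by
  have hu : (row ++ ["#"]).getLast? = some "#" := by
    rw [List.getLast?_append_of_ne_nil _ (by simp)]; rfl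
  have hmain := main_lemma (row ++ ["#"]).length (row ++ ["#"]) []
      ("#" :: (row ++ ["#"])) (le_refl _) (by simp) (Or.inr hu)
  simp only [List.length_nil, Nat.cast_zero, zero_add] at hmain
  simp only [weight_in_column, weight_in_column_alt]
  rw [PySem.List.slice_to_neg_one, PySem.List.slice_from_one, foldObs, foldAdj]
  rw [foldB]
  simp only [zero_add]
  rw [hmain]
  show gW _ ("#" :: (row ++ ["#"])) 0 0 = _
  simp only [gW, zero_add]

-- ===== VERDICT (by name: the statement is the Claim_ definition above) =====
theorem weight_in_column_spec : Claim_equal_weight_in_column := by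
  intro row _
  exact weight_in_column_eq row
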